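-- pv_equiv track=rewrite | github.com/earth2378/MinimumGasDetection | minimumGas.py | calOverhead
-- ===== SOURCE A (Python) =====
-- def calOverhead(counter):
--     totalTx = 0
--     tick = 0
--     for i in counter:
--         totalTx += i[1]
--     overhead,overheadCount = [],[]
--     for i in range(len(counter)):
--         overhead.append(counter[i][0])
--         overheadCount.append(totalTx-counter[i][1]-tick)
--         tick += counter[i][1]
--     return (overhead,overheadCount)
-- ===== SOURCE B (Python) =====
-- def calOverhead(counter):
--     # Single reverse pass with a running suffix sum; no total/tick bookkeeping.
--     tmp = []
--     acc = 0
--     for row in reversed(counter):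
--         tmp.append(acc)
--         acc += row[1]
--     tmp.reverse()
--     overhead = [row[0] for row in counter]
--     return (overhead, tmp)
-- ===== Notes on version B (the rewrite author's own statement) =====
-- stated objective: simpler
-- what changed: Replaces the two passes with total/tick bookkeeping (count = total - own - prefix) by one reverse pass keeping a running suffix sum, plus a forward comprehension for the first components.
import Mathlib
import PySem

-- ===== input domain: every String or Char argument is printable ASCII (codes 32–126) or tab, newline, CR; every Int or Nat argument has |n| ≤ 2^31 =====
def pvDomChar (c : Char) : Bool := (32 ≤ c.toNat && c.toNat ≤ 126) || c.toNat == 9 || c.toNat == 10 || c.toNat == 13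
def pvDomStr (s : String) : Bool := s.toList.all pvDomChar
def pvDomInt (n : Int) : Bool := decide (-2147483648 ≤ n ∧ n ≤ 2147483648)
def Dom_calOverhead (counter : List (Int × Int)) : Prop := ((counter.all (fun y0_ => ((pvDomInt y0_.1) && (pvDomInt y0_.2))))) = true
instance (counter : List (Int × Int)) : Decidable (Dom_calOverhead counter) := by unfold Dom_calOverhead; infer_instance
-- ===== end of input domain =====

-- B replaces A's total/tick bookkeeping by one reverse pass with a running suffix sum (objective: simpler).

-- ===== PORT A =====
def calOverhead (counter : List (Int × Int)) : List Int × List Int :=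
  let totalTx : Int := counter.foldl (fun acc i => acc + i.2) 0
  -- tick starts at 0; the second loop is over range(len(counter)) with indexing
  -- counter[i]: the index is always in range, so pyGetD with a dummy default is exact.
  let s := (PySem.List.pyRange 0 (PySem.List.len counter) 1).foldl
    (fun (st : List Int × List Int × Int) i =>
      let x := PySem.List.pyGetD counter i (0, 0)
      (st.1 ++ [x.1], st.2.1 ++ [totalTx - x.2 - st.2.2], st.2.2 + x.2))
    ([], [], 0)
  (s.1, s.2.1)

-- ===== PORT B =====
def calOverhead_alt (counter : List (Int × Int)) : List Int × List Int :=
  let s := counter.reverse.foldl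
    (fun (st : List Int × Int) row => (st.1 ++ [st.2], st.2 + row.2)) ([], 0)
  (counter.map Prod.fst, s.1.reverse)

-- ===== PRECONDITION & SPEC =====
def Spec_calOverhead (counter : List (Int × Int)) (out : List Int × List Int) : Prop := out = calOverhead_alt counter
instance (counter : List (Int × Int)) (out : List Int × List Int) : Decidable (Spec_calOverhead counter out) := by unfold Spec_calOverhead; infer_instance

-- ===== CLAIM (what is proved, stated in full; the proofs are below) =====
def Claim_equal_calOverhead : Prop := ∀ (counter : List (Int × Int)), Dom_calOverhead counter → Spec_calOverhead counter (calOverhead counter)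

-- ===== LEMMAS AND PROOFS =====

-- suffix sums: sufs l = [sum of snds after position i | i < length l]
def sufs : List (Int × Int) → List Int
  | [] => []
  | _ :: xs => (xs.map Prod.snd).sum :: sufs xs

-- A's counts, parametrised by the remaining budget r = totalTx - tick
def gsuf : Int → List (Int × Int) → List Int
  | _, [] => []
  | r, x :: xs => (r - x.2) :: gsuf (r - x.2) xs

theorem gsuf_sum (l : List (Int × Int)) : gsuf (l.map Prod.snd).sum l = sufs l := by
  induction l with
  | nil => rfl
  | cons x xs ih => simp [gsuf, sufs, ih]

theorem foldl_snd_sum (l : List (Int × Int)) (a : Int) :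
    l.foldl (fun acc i => acc + i.2) a = a + (l.map Prod.snd).sum := by
  induction l generalizing a with
  | nil => simp
  | cons x xs ih => simp [List.foldl, ih (a + x.2)]; ring

theorem aLoop_eq (T : Int) (l : List (Int × Int)) (oh oc : List Int) (t : Int) :
    l.foldl (fun (st : List Int × List Int × Int) x =>
        (st.1 ++ [x.1], st.2.1 ++ [T - x.2 - st.2.2], st.2.2 + x.2)) (oh, oc, t)
      = (oh ++ l.map Prod.fst, oc ++ gsuf (T - t) l, t + (l.map Prod.snd).sum) := by
  induction l generalizing oh oc t with
  | nil => simp [gsuf]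
  | cons x xs ih =>
    simp only [List.foldl, List.map, gsuf]
    rw [ih]
    have h1 : T - x.2 - t = T - t - x.2 := by ring
    have h2 : T - (t + x.2) = T - t - x.2 := by ring
    simp [h1, h2]; ring

theorem bLoop_eq (l : List (Int × Int)) :
    l.reverse.foldl (fun (st : List Int × Int) row => (st.1 ++ [st.2], st.2 + row.2)) ([], 0)
      = ((sufs l).reverse, (l.map Prod.snd).sum) := by
  induction l with
  | nil => rfl
  | cons x xs ih =>
    simp only [List.reverse_cons, List.foldl_append, ih, List.foldl, sufs]
    simp [add_comm]

-- ===== VERDICT (by name: the statement is the Claim_ definition above) =====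
theorem calOverhead_spec : Claim_equal_calOverhead := by
  intro counter _
  show _ = _
  unfold calOverhead calOverhead_alt
  rw [bLoop_eq]
  simp only [foldl_snd_sum, zero_add, PySem.List.len_eq]
  rw [PySem.List.foldl_pyRange_zero_pyGetD' counter (0, 0)
        (fun (st : List Int × List Int × Int) x =>
          (st.1 ++ [x.1], st.2.1 ++ [(counter.map Prod.snd).sum - x.2 - st.2.2], st.2.2 + x.2))
        ([], [], 0)]
  · rw [aLoop_eq]
    simp [gsuf_sum]
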